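-- pv_equiv track=rewrite | github.com/pypi-data/pypi-mirror-318 | packages/domainname/domainname-0.0.2-py3-none-any.whl/domainname/main.py | expand_set
-- ===== SOURCE A (Python) =====
-- def expand_set(keyword) -> list[str]:
--     expanded_keyword = []
--     start = []
--     fillers = []
--     end = []
--
--     put_to = start
--     for letter in keyword:
--         if letter == '[':
--             put_to = fillers
--             continue
--         elif letter == ']':
--             put_to = end
--             continue
--
--         put_to.append(letter)
--
--
--     for filler in fillers:
--         keyword = f'{"".join(start)}{filler}{"".join(end)}'
--         expanded_keyword.append(keyword)
--     return expanded_keyword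
-- ===== SOURCE B (Python) =====
-- def expand_set(keyword) -> list[str]:
--     # Back-to-front single pass: walk the string reversed, keeping a buffer of
--     # pending characters (in reverse order); a '[' seen in reverse flushes the
--     # buffer into fillers, a ']' flushes it into end, and whatever remains at
--     # the finish is start.
--     pending = []
--     fillers = ''
--     end = ''
--     for letter in reversed(keyword):
--         if letter == '[':
--             fillers = ''.join(reversed(pending)) + fillers
--             pending = []
--         elif letter == ']':
--             end = ''.join(reversed(pending)) + end
--             pending = []
--         else:
--             pending.append(letter)
--     start = ''.join(reversed(pending))
--     return [start + ch + end for ch in fillers]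
-- ===== Notes on version B (the rewrite author's own statement) =====
-- stated objective: alternative
-- what changed: Replaces A's forward state machine that routes each character through a mutable put_to reference into three lists with a single reverse pass that accumulates a pending buffer and flushes it into fillers/end when a bracket is met, the leftover buffer being start.
import Mathlib
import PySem

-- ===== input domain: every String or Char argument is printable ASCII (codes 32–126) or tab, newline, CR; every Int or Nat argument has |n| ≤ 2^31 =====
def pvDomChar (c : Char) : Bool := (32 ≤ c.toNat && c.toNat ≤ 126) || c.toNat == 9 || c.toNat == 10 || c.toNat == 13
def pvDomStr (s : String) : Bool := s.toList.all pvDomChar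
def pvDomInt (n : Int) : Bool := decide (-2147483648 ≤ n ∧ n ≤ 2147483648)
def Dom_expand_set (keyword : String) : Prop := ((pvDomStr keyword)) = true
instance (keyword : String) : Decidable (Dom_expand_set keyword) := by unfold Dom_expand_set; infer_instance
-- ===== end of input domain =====

-- B replaces A's forward state machine (mutable put_to routing) by a single reverse
-- pass with a pending buffer flushed into fillers/end at each bracket (same cost).

-- ===== PORT A =====
-- state: ((start, fillers, end), put_to) with put_to 0 = start, 1 = fillers, 2 = end
def aStep (st : (List Char × List Char × List Char) × Nat) (letter : Char) :
    (List Char × List Char × List Char) × Nat :=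
  if letter = '[' then (st.1, 1)
  else if letter = ']' then (st.1, 2)
  else
    match st with
    | ((s, f, e), 0) => ((s ++ [letter], f, e), 0)
    | ((s, f, e), 1) => ((s, f ++ [letter], e), 1)
    | ((s, f, e), m) => ((s, f, e ++ [letter]), m)

def expand_set (keyword : String) : List String :=
  let st := keyword.toList.foldl aStep (([], [], []), 0)
  match st with
  | ((s, f, e), _) => f.map (fun filler => String.ofList (s ++ [filler] ++ e))

-- ===== PORT B =====
-- state: (pending-reversed, fillers, end); a bracket flushes pending into its bucket
def bStep (st : List Char × List Char × List Char) (letter : Char) :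
    List Char × List Char × List Char :=
  match st with
  | (p, f, e) =>
    if letter = '[' then ([], p.reverse ++ f, e)
    else if letter = ']' then ([], f, p.reverse ++ e)
    else (p ++ [letter], f, e)

def expand_set_alt (keyword : String) : List String :=
  match keyword.toList.reverse.foldl bStep ([], [], []) with
  | (p, f, e) => f.map (fun ch => String.ofList (p.reverse ++ [ch] ++ e))

-- ===== PRECONDITION & SPEC =====
def Spec_expand_set (keyword : String) (out : List String) : Prop := out = expand_set_alt keyword
instance (keyword : String) (out : List String) : Decidable (Spec_expand_set keyword out) := by unfold Spec_expand_set; infer_instance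

-- ===== CLAIM (what is proved, stated in full; the proofs are below) =====
def Claim_equal_expand_set : Prop := ∀ (keyword : String), Dom_expand_set keyword → Spec_expand_set keyword (expand_set keyword)

-- ===== LEMMAS AND PROOFS =====

-- A's fold from a general initial state = initial components ++ fold-from-empty components
theorem aFoldl_shift (cs : List Char) (s f e : List Char) (m : Nat) :
    cs.foldl aStep ((s, f, e), m) =
      (((s ++ (cs.foldl aStep (([], [], []), m)).1.1,
         f ++ (cs.foldl aStep (([], [], []), m)).1.2.1,
         e ++ (cs.foldl aStep (([], [], []), m)).1.2.2)),
        (cs.foldl aStep (([], [], []), m)).2) := by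
  induction cs generalizing s f e m with
  | nil => simp
  | cons c cs ih =>
    by_cases h1 : c = '['
    · subst h1
      have hs : ∀ s f e : List Char, aStep ((s, f, e), m) '[' = ((s, f, e), 1) := by
        intro s f e; simp [aStep]
      rw [List.foldl_cons, List.foldl_cons, hs, hs]
      exact ih s f e 1
    · by_cases h2 : c = ']'
      · subst h2
        have hs : ∀ s f e : List Char, aStep ((s, f, e), m) ']' = ((s, f, e), 2) := by
          intro s f e; simp [aStep, h1]
        rw [List.foldl_cons, List.foldl_cons, hs, hs]
        exact ih s f e 2
      · match m with
        | 0 =>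
          have hg : aStep ((s, f, e), 0) c = ((s ++ [c], f, e), 0) := by simp [aStep, h1, h2]
          have hz : aStep (([], [], []), 0) c = (([c], [], []), 0) := by simp [aStep, h1, h2]
          rw [List.foldl_cons, List.foldl_cons, hg, hz,
            ih (s ++ [c]) f e 0, ih [c] [] [] 0]
          simp [List.append_assoc]
        | 1 =>
          have hg : aStep ((s, f, e), 1) c = ((s, f ++ [c], e), 1) := by simp [aStep, h1, h2]
          have hz : aStep (([], [], []), 1) c = (([], [c], []), 1) := by simp [aStep, h1, h2]
          rw [List.foldl_cons, List.foldl_cons, hg, hz,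
            ih s (f ++ [c]) e 1, ih [] [c] [] 1]
          simp [List.append_assoc]
        | Nat.succ (Nat.succ m) =>
          have hg : aStep ((s, f, e), m + 2) c = ((s, f, e ++ [c]), m + 2) := by
            simp [aStep, h1, h2]
          have hz : aStep (([], [], []), m + 2) c = (([], [], [c]), m + 2) := by
            simp [aStep, h1, h2]
          rw [List.foldl_cons, List.foldl_cons, hg, hz,
            ih s f (e ++ [c]) (m + 2), ih [] [] [c] (m + 2)]
          simp [List.append_assoc]

-- B's reverse pass as a foldr
def bRun (cs : List Char) : List Char × List Char × List Char :=
  cs.foldr (fun c st => bStep st c) ([], [], [])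

theorem bRun_eq_reverse_foldl (cs : List Char) :
    cs.reverse.foldl bStep ([], [], []) = bRun cs := by
  simp [bRun, List.foldl_reverse]

-- joint characterisation of A's fold (from empty, modes 0/1/2) by B's reverse pass
theorem aFoldl_eq_bRun (cs : List Char) :
    (cs.foldl aStep (([], [], []), 0)).1 =
      ((bRun cs).1.reverse, (bRun cs).2.1, (bRun cs).2.2) ∧
    (cs.foldl aStep (([], [], []), 1)).1 =
      ([], (bRun cs).1.reverse ++ (bRun cs).2.1, (bRun cs).2.2) ∧
    (∀ m : Nat, (cs.foldl aStep (([], [], []), m + 2)).1 =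
      ([], (bRun cs).2.1, (bRun cs).1.reverse ++ (bRun cs).2.2)) := by
  induction cs with
  | nil => simp [bRun]
  | cons c cs ih =>
    obtain ⟨ih0, ih1, ih2⟩ := ih
    have ih2' : (cs.foldl aStep (([], [], []), 2)).1 =
        ([], (bRun cs).2.1, (bRun cs).1.reverse ++ (bRun cs).2.2) := ih2 0
    by_cases h1 : c = '['
    · subst h1
      have hstep : ∀ m : Nat, ('[' :: cs).foldl aStep (([], [], []), m) =
          cs.foldl aStep (([], [], []), 1) := by
        intro m; rw [List.foldl_cons]; congr 1; try simp [aStep]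
      have hbr : bRun ('[' :: cs) =
          ([], (bRun cs).1.reverse ++ (bRun cs).2.1, (bRun cs).2.2) := by
        simp [bRun, bStep]
      refine ⟨?_, ?_, fun m => ?_⟩ <;> (rw [hstep, hbr, ih1]; try simp)
    · by_cases h2 : c = ']'
      · subst h2
        have hstep : ∀ m : Nat, (']' :: cs).foldl aStep (([], [], []), m) =
            cs.foldl aStep (([], [], []), 2) := by
          intro m; rw [List.foldl_cons]; congr 1; try simp [aStep, h1]
        have hbr : bRun (']' :: cs) =
            ([], (bRun cs).2.1, (bRun cs).1.reverse ++ (bRun cs).2.2) := by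
          simp [bRun, bStep]
        refine ⟨?_, ?_, fun m => ?_⟩ <;> (rw [hstep, hbr, ih2']; try simp)
      · have hbr : bRun (c :: cs) =
            ((bRun cs).1 ++ [c], (bRun cs).2.1, (bRun cs).2.2) := by
          simp [bRun, bStep, h1, h2]
        refine ⟨?_, ?_, fun m => ?_⟩
        · have hz : aStep (([], [], []), 0) c = (([c], [], []), 0) := by simp [aStep, h1, h2]
          rw [List.foldl_cons, hz, aFoldl_shift cs [c] [] [] 0, hbr]
          simp [ih0]
        · have hz : aStep (([], [], []), 1) c = (([], [c], []), 1) := by simp [aStep, h1, h2]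
          rw [List.foldl_cons, hz, aFoldl_shift cs [] [c] [] 1, hbr]
          simp [ih1]
        · have hz : aStep (([], [], []), m + 2) c = (([], [], [c]), m + 2) := by
            simp [aStep, h1, h2]
          rw [List.foldl_cons, hz, aFoldl_shift cs [] [] [c] (m + 2), hbr]
          simp [ih2 m]

-- ===== VERDICT (by name: the statement is the Claim_ definition above) =====
theorem expand_set_spec : Claim_equal_expand_set := by
  intro keyword _
  unfold Spec_expand_set expand_set expand_set_alt
  rw [bRun_eq_reverse_foldl]
  have h := (aFoldl_eq_bRun keyword.toList).1
  rcases hA : keyword.toList.foldl aStep (([], [], []), 0) with ⟨⟨s, f, e⟩, m⟩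
  rcases hB : bRun keyword.toList with ⟨p, fb, eb⟩
  rw [hA, hB] at h
  simp only [Prod.mk.injEq] at h
  obtain ⟨h1, h2, h3⟩ := h
  simp [h1, h2, h3]
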